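-- pv_equiv track=rewrite | github.com/riju-talk/college | Sem1/Assignment RND/Assignement-3/split_s.py | split_sen
-- ===== SOURCE A (Python) =====
-- def split_sen(x):
--     ls=[]
--     while(len(x)!=0):
--         for i in x:
--             if(i=="."):
--                 ls.append(x[:x.index(i)].strip())
--                 break
--         x=x[x.index(i)+1:]
--     return ls
-- ===== SOURCE B (Python) =====
-- def split_sen(x):
--     ls = []
--     cur = ""
--     for ch in x:
--         if ch == ".":
--             ls.append(cur.strip())
--             cur = ""
--         else:
--             cur += ch
--     return ls
-- ===== Notes on version B (the rewrite author's own statement) =====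
-- stated objective: faster
-- what changed: Replaced A's repeated index/slice rescans of the shrinking string with a single left-to-right pass that maintains a running segment buffer, flushing it at each period and never flushing the trailing segment.
import Mathlib
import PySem

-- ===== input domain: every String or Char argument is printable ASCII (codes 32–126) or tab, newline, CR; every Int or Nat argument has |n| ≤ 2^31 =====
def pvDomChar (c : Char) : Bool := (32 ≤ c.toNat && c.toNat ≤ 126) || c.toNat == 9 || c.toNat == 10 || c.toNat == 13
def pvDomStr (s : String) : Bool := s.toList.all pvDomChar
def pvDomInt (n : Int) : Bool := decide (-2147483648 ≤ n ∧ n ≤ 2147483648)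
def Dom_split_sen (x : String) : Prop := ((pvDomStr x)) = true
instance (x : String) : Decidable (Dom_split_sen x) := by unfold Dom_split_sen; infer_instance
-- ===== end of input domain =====

-- B replaces A's O(n^2) repeated index/slice rescans with one O(n) pass keeping a running segment buffer (objective: faster).

-- ===== PORT A =====
-- A's while-loop: scan for the first '.', append the stripped prefix and cut past it;
-- if no '.' remains, the for-loop leaves i = last char and x is cut past its FIRST occurrence.
def split_senLoop (x : List Char) (ls : List String) : List String :=
  if hx : x = [] then ls
  else
    match h : PySem.List.index? x '.' with
    | some j =>
        split_senLoop (x.drop (j+1)) (ls ++ [PySem.Str.strip (String.ofList (x.take j))])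
    | none =>
        match h2 : PySem.List.index? x (x.getLast hx) with
        | some j => split_senLoop (x.drop (j+1)) ls
        | none => ls   -- unreachable: the last char is a member of x
termination_by x.length
decreasing_by
  · obtain ⟨hk, -, -⟩ := PySem.List.getElem_of_index?_eq_some h
    have : x.length ≠ 0 := fun h0 => hx (List.eq_nil_of_length_eq_zero h0)
    simp [List.length_drop]; omega
  · obtain ⟨hk, -, -⟩ := PySem.List.getElem_of_index?_eq_some h2
    have : x.length ≠ 0 := fun h0 => hx (List.eq_nil_of_length_eq_zero h0)
    simp [List.length_drop]; omega

def split_sen (x : String) : List String := split_senLoop x.toList []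

-- ===== PORT B =====
-- one step of B's for-loop over the characters: flush the buffer at '.', otherwise extend it
def altStep (p : List String × List Char) (ch : Char) : List String × List Char :=
  if ch = '.' then (p.1 ++ [PySem.Str.strip (String.ofList p.2)], [])
  else (p.1, p.2 ++ [ch])

def split_sen_alt (x : String) : List String :=
  (x.toList.foldl altStep ([], [])).1

-- ===== PRECONDITION & SPEC =====
def Spec_split_sen (x : String) (out : List String) : Prop := out = split_sen_alt x
instance (x : String) (out : List String) : Decidable (Spec_split_sen x out) := by unfold Spec_split_sen; infer_instance

-- ===== CLAIM (what is proved, stated in full; the proofs are below) =====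
def Claim_equal_split_sen : Prop := ∀ (x : String), Dom_split_sen x → Spec_split_sen x (split_sen x)

-- ===== LEMMAS AND PROOFS =====

theorem altStep_dot (p : List String × List Char) :
    altStep p '.' = (p.1 ++ [PySem.Str.strip (String.ofList p.2)], []) := by
  simp [altStep]

theorem altStep_ne (p : List String × List Char) (c : Char) (h : c ≠ '.') :
    altStep p c = (p.1, p.2 ++ [c]) := by
  simp [altStep, h]

theorem altStep_acc (l : List Char) (acc : List String) (cur : List Char) :
    l.foldl altStep (acc, cur) =
      (acc ++ (l.foldl altStep ([], cur)).1, (l.foldl altStep ([], cur)).2) := by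
  induction l generalizing acc cur with
  | nil => simp
  | cons c t ih =>
    by_cases hc : c = '.'
    · subst hc
      simp only [List.foldl_cons, altStep_dot, List.nil_append]
      rw [ih, ih [PySem.Str.strip (String.ofList cur)] []]
      simp
    · simp only [List.foldl_cons, altStep_ne _ _ hc]
      exact ih acc (cur ++ [c])

theorem altStep_nodot (l : List Char) (acc : List String) (cur : List Char)
    (h : '.' ∉ l) : l.foldl altStep (acc, cur) = (acc, cur ++ l) := by
  induction l generalizing cur with
  | nil => simp
  | cons c t ih =>
    have hc : c ≠ '.' := fun hh => h (hh ▸ List.mem_cons_self)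
    simp only [List.foldl_cons, altStep_ne _ _ hc]
    rw [ih _ (fun hm => h (List.mem_cons_of_mem _ hm))]
    simp

theorem loop_eq_fold (n : ℕ) (l : List Char) (hn : l.length ≤ n) (ls : List String) :
    split_senLoop l ls = ls ++ (l.foldl altStep ([], [])).1 := by
  induction n generalizing l ls with
  | zero =>
    have : l = [] := List.eq_nil_of_length_eq_zero (Nat.le_zero.mp hn)
    subst this; simp [split_senLoop]
  | succ n ih =>
    by_cases hx : l = []
    · subst hx; simp [split_senLoop]
    · rw [split_senLoop]
      rw [dif_neg hx]
      split
      case _ j h =>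
        have hjlt : j < l.length := by
          obtain ⟨hk, -, -⟩ := PySem.List.getElem_of_index?_eq_some h
          exact hk
        have hlen2 : (l.drop (j+1)).length ≤ n := by
          rw [List.length_drop]; omega
        obtain ⟨pre, suf, hl, hlen, hnm⟩ := (PySem.List.index?_eq_some_iff l '.' j).mp h
        have hdrop : l.drop (j+1) = suf := by
          subst hl
          rw [show pre ++ '.' :: suf = (pre ++ ['.']) ++ suf by simp,
              show j + 1 = (pre ++ ['.']).length by simp [hlen],
              List.drop_left]
        have htake : l.take j = pre := by
          subst hl
          rw [← hlen, List.take_left]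
        rw [ih (l.drop (j+1)) hlen2]
        rw [hdrop, htake]
        conv_rhs => rw [hl]
        rw [List.foldl_append, altStep_nodot pre [] [] hnm]
        simp only [List.nil_append, List.foldl_cons, altStep_dot]
        conv_rhs => rw [altStep_acc]
        simp
      case _ h =>
        have hnm : '.' ∉ l := (PySem.List.index?_eq_none_iff l '.').mp h
        split
        case _ j h2 =>
          have hjlt : j < l.length := by
            obtain ⟨hk, -, -⟩ := PySem.List.getElem_of_index?_eq_some h2
            exact hk
          have hlen2 : (l.drop (j+1)).length ≤ n := by
            rw [List.length_drop]; omega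
          rw [ih (l.drop (j+1)) hlen2]
          have hnm2 : '.' ∉ l.drop (j+1) := fun hm => hnm (List.mem_of_mem_drop hm)
          rw [altStep_nodot _ [] [] hnm2, altStep_nodot _ [] [] hnm]
        case _ h2 =>
          have := (PySem.List.index?_isSome_iff l (l.getLast hx)).mpr (List.getLast_mem hx)
          rw [h2] at this
          simp at this

-- ===== VERDICT (by name: the statement is the Claim_ definition above) =====
theorem split_sen_spec : Claim_equal_split_sen := by
  intro x _
  unfold Spec_split_sen split_sen split_sen_alt
  simpa using loop_eq_fold x.toList.length x.toList le_rfl []
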